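-- pv_equiv track=rewrite | github.com/nawue/CodeChallanges | 2020/Round-A/Bunding.py | Solve
-- ===== SOURCE A (Python) =====
-- def Solve(N,K,V):
--
--     if V == []:
--         return 0
--
--     match=1
--     V.sort()
--     V.sort(key=len, reverse=False)
--
--     for i in range(1, len(V)):
--         if V[0] == V[i]:
--             match += 1
--
--     if match >= K:
--         match = len(V[0])
--     if match == 1 and len(V[0]) != 1:
--         match = 0
--
--     auxV = [k for k in V if len(k) > len(V[0])]
--
--     return match + Solve(N,K,auxV)
-- ===== SOURCE B (Python) =====
-- def Solve(N, K, V):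
--     # One pass: group by length, keeping the lex-min string of each group and
--     # how many times that min occurs; then one pass over the groups to score.
--     groups = {}
--     for s in V:
--         L = len(s)
--         if L not in groups:
--             groups[L] = (s, 1)
--         else:
--             m, c = groups[L]
--             if s < m:
--                 groups[L] = (s, 1)
--             elif s == m:
--                 groups[L] = (m, c + 1)
--     total = 0
--     for L, (m, c) in groups.items():
--         if c >= K:
--             total += L
--         elif c > 1 or L == 1:
--             total += c
--     return total
-- ===== Notes on version B (the rewrite author's own statement) =====
-- stated objective: faster
-- what changed: Replaces the per-length-level recursion that re-sorts the whole remaining list at every level with a single pass that groups strings by length in a dict, keeping each group's lex-min string and its multiplicity, then scores each group once.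
import Mathlib
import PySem

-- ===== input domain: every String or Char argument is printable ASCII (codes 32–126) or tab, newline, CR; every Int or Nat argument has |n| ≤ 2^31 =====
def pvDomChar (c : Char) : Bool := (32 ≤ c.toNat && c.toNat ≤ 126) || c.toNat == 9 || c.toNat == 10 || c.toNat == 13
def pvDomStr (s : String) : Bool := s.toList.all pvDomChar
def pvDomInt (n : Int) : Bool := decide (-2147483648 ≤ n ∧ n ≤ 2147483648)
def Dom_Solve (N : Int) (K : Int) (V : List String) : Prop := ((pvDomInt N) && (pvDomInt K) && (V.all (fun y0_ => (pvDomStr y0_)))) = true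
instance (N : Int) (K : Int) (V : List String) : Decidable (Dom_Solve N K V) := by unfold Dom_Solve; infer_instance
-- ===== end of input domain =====

-- B replaces A's per-length-level recursion (which re-sorts the remaining list at every
-- level) by one dict-grouping pass plus one scoring pass.  A sorts its argument in place
-- (B does not mutate); the equivalence proved here is about the return value.

-- ===== PORT A =====
-- literal port of A: sort lexicographically, then stably by length; count copies of V[0];
-- score; recurse on the strings strictly longer than V[0].
def Solve (N : Int) (K : Int) (V : List String) : Int :=
  if V = [] then 0
  else
    let V1 := PySem.List.sorted V (fun s => s)
    let V2 := PySem.List.sorted V1 (fun s => PySem.Str.len s)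
    let m1 := (PySem.List.pyRange 1 (PySem.List.len V2)).foldl
        (fun acc i => if PySem.List.pyGetD V2 0 "" == PySem.List.pyGetD V2 i "" then acc + 1 else acc) 1
    let m2 := if m1 ≥ K then PySem.Str.len (PySem.List.pyGetD V2 0 "") else m1
    let m3 := if m2 = 1 ∧ PySem.Str.len (PySem.List.pyGetD V2 0 "") ≠ 1 then 0 else m2
    let auxV := V2.filter (fun k => PySem.Str.len (PySem.List.pyGetD V2 0 "") < PySem.Str.len k)
    m3 + Solve N K auxV
termination_by V.length
decreasing_by
  rename_i hV
  have h2 : V2.length = V.length := by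
    simp [V2, V1, PySem.List.length_sorted]
  have hne : V2 ≠ [] := by
    simp only [V2, V1, ne_eq, PySem.List.sorted_eq_nil_iff]; exact hV
  have hmem : PySem.List.pyGetD V2 0 "" ∈ V2 := by
    have hlen : (0:Int) < V2.length := by
      have := List.length_pos_of_ne_nil hne
      exact_mod_cast this
    rw [PySem.List.pyGetD_eq_getElem V2 "" (by omega) hlen]
    exact List.getElem_mem _
  have : (V2.filter (fun k => decide (PySem.Str.len (PySem.List.pyGetD V2 0 "") < PySem.Str.len k))).length < V2.length := by
    rw [List.length_filter_lt_length_iff_exists]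
    exact ⟨_, hmem, by simp⟩
  simpa [h2] using this

-- ===== PORT B =====
-- helper of B: fold one string into the per-length dict of (lex-min string, its count)
def solveStep (d : PySem.Dict Int (String × Int)) (s : String) : PySem.Dict Int (String × Int) :=
  match d.get? (PySem.Str.len s) with
  | none => d.insert (PySem.Str.len s) (s, 1)
  | some mc =>
    if s < mc.1 then d.insert (PySem.Str.len s) (s, 1)
    else if s = mc.1 then d.insert (PySem.Str.len s) (mc.1, mc.2 + 1)
    else d

def Solve_alt (N : Int) (K : Int) (V : List String) : Int :=
  let groups := V.foldl solveStep PySem.Dict.empty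
  groups.items.foldl (fun tot p =>
    if p.2.2 ≥ K then tot + p.1
    else if p.2.2 > 1 ∨ p.1 = 1 then tot + p.2.2
    else tot) 0

-- ===== PRECONDITION & SPEC =====
def Spec_Solve (N : Int) (K : Int) (V : List String) (out : Int) : Prop := out = Solve_alt N K V
instance (N : Int) (K : Int) (V : List String) (out : Int) : Decidable (Spec_Solve N K V out) := by unfold Spec_Solve; infer_instance

-- ===== CLAIM (what is proved, stated in full; the proofs are below) =====
def Claim_equal_Solve : Prop := ∀ (N : Int) (K : Int) (V : List String), Dom_Solve N K V → Spec_Solve N K V (Solve N K V)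

-- ===== LEMMAS AND PROOFS =====

-- the length-L group of V
def grp (V : List String) (L : Int) : List String := V.filter (fun s => PySem.Str.len s == L)

-- lexicographic minimum of a list of strings (none on [])
def gmin : List String → Option String
  | [] => none
  | x :: t => some (t.foldl min x)

-- the score A assigns to a group whose lex-min occurs c times
def sc (K L c : Int) : Int := if c ≥ K then L else if c = 1 ∧ L ≠ 1 then 0 else c

def score (K : Int) (V : List String) (L : Int) : Int :=
  match gmin (grp V L) with
  | none => 0
  | some m => sc K L ((grp V L).count m : Int)

-- the common functional specification: sum of group scores over the distinct lengths
def sumScore (K : Int) (V : List String) : Int :=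
  ∑ L ∈ (V.map PySem.Str.len).toFinset, score K V L

-- ---- gmin characterisation ----
theorem gmin_eq_some_iff (G : List String) (m : String) :
    gmin G = some m ↔ m ∈ G ∧ ∀ y ∈ G, m ≤ y := by
  cases G with
  | nil => simp [gmin]
  | cons x t =>
    have hmem := PySem.List.foldl_min_mem t x
    have hle := PySem.List.foldl_min_le t x
    constructor
    · intro h
      simp only [gmin, Option.some.injEq] at h
      subst h
      refine ⟨?_, ?_⟩
      · rcases hmem with h | h
        · rw [h]; exact List.mem_cons_self
        · exact List.mem_cons_of_mem _ h
      · intro y hy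
        rcases List.mem_cons.mp hy with rfl | hy
        · exact hle.1
        · exact hle.2 y hy
    · rintro ⟨hm, hmin⟩
      simp only [gmin, Option.some.injEq]
      apply le_antisymm
      · rcases List.mem_cons.mp hm with rfl | hm
        · exact hle.1
        · exact hle.2 m hm
      · rcases hmem with h | h
        · rw [h]; exact hmin x List.mem_cons_self
        · exact hmin _ (List.mem_cons_of_mem _ h)

theorem gmin_perm {G G' : List String} (h : G.Perm G') : gmin G = gmin G' := by
  cases hG : gmin G with
  | none =>
    cases hG' : gmin G' with
    | none => rfl
    | some m' =>
      cases G with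
      | nil => cases h.nil_eq; simp [gmin] at hG'
      | cons x t => simp [gmin] at hG
  | some m =>
    rw [gmin_eq_some_iff] at hG
    symm
    rw [gmin_eq_some_iff]
    exact ⟨h.mem_iff.mp hG.1, fun y hy => hG.2 y (h.mem_iff.mpr hy)⟩

theorem score_congr_perm (K L : Int) {V W : List String} (h : (grp V L).Perm (grp W L)) :
    score K V L = score K W L := by
  unfold score
  rw [gmin_perm h]
  cases gmin (grp W L) with
  | none => rfl
  | some m => simp [h.count_eq]

-- ---- first minimal-key element (the head a stable sort by key produces) ----
def firstMin (key : String → Int) : List String → Option String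
  | [] => none
  | x :: xs =>
    match firstMin key xs with
    | none => some x
    | some m => if key x ≤ key m then some x else some m

theorem firstMin_eq_none_iff (key : String → Int) (l : List String) :
    firstMin key l = none ↔ l = [] := by
  cases l with
  | nil => simp [firstMin]
  | cons x xs =>
    simp only [firstMin]
    cases firstMin key xs with
    | none => simp
    | some m => simp only [reduceCtorEq, iff_false]; split <;> simp

theorem firstMin_min (key : String → Int) (l : List String) (m : String)
    (h : firstMin key l = some m) : m ∈ l ∧ ∀ y ∈ l, key m ≤ key y := by
  induction l generalizing m with
  | nil => simp [firstMin] at h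
  | cons x xs ih =>
    simp only [firstMin] at h
    cases hx : firstMin key xs with
    | none =>
      rw [hx] at h
      have hnil := (firstMin_eq_none_iff key xs).mp hx
      subst hnil
      simp at h
      subst h
      simp
    | some m' =>
      rw [hx] at h
      have ih' := ih m' hx
      by_cases hk : key x ≤ key m'
      · simp [hk] at h
        subst h
        refine ⟨List.mem_cons_self, ?_⟩
        intro y hy
        rcases List.mem_cons.mp hy with rfl | hy
        · exact le_refl _
        · exact le_trans hk (ih'.2 y hy)
      · simp [hk] at h
        subst h
        refine ⟨List.mem_cons_of_mem _ ih'.1, ?_⟩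
        intro y hy
        rcases List.mem_cons.mp hy with rfl | hy
        · omega
        · exact ih'.2 y hy

theorem firstMin_append_singleton (key : String → Int) (l : List String) (x : String) :
    firstMin key (l ++ [x]) =
      match firstMin key l with
      | none => some x
      | some m => if key m ≤ key x then some m else some x := by
  induction l with
  | nil => simp [firstMin]
  | cons a l ih =>
    simp only [List.cons_append, firstMin, ih]
    cases h : firstMin key l with
    | none => rfl
    | some m =>
      by_cases q : key m ≤ key x <;> by_cases p : key a ≤ key m <;> by_cases r : key a ≤ key x <;>
        simp only [q, p, r, if_true, if_false] <;> first | rfl | (exfalso; omega)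

theorem head_foldl_insertBy (key : String → Int) :
    ∀ (xs processed acc : List String),
      acc.head? = firstMin key processed →
      ((xs.foldl (fun acc x => PySem.List.insertBy (fun a b => decide (key a < key b)) x acc) acc).head?
        = firstMin key (processed ++ xs)) := by
  intro xs
  induction xs with
  | nil => intro processed acc h; simpa using h
  | cons x xs ih =>
    intro processed acc h
    have hstep : (PySem.List.insertBy (fun a b => decide (key a < key b)) x acc).head?
        = firstMin key (processed ++ [x]) := by
      rw [firstMin_append_singleton]
      cases acc with
      | nil =>
        have : firstMin key processed = none := by rw [← h]; rfl
        rw [this]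
        simp [PySem.List.insertBy]
      | cons a t =>
        have ha : firstMin key processed = some a := by rw [← h]; rfl
        rw [ha]
        have hred : (match some a with
            | none => some x
            | some m => if key m ≤ key x then some m else some x)
            = if key a ≤ key x then some a else some x := rfl
        rw [hred]
        by_cases hk : key x < key a
        · rw [if_neg (by omega)]
          simp [PySem.List.insertBy, hk]
        · rw [if_pos (by omega)]
          simp [PySem.List.insertBy, hk]
    have := ih (processed ++ [x]) _ hstep
    simpa [List.append_assoc] using this

theorem head_sorted_eq_firstMin (key : String → Int) (xs : List String) :
    (PySem.List.sorted xs key).head? = firstMin key xs := by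
  rw [PySem.List.sorted_eq_foldl_insertBy]
  have := head_foldl_insertBy key xs [] [] (by rfl)
  simpa using this

theorem firstMin_lex_min (l : List String) (h : String)
    (hp : l.Pairwise (· ≤ ·)) (hf : firstMin PySem.Str.len l = some h) :
    ∀ y ∈ l, PySem.Str.len y = PySem.Str.len h → h ≤ y := by
  induction l generalizing h with
  | nil => simp
  | cons a t ih =>
    simp only [firstMin] at hf
    cases hx : firstMin PySem.Str.len t with
    | none =>
      rw [hx] at hf
      simp at hf
      subst hf
      have hnil := (firstMin_eq_none_iff _ t).mp hx
      subst hnil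
      intro y hy _
      simp at hy
      subst hy
      exact le_refl _
    | some m' =>
      rw [hx] at hf
      have hred : (match some m' with
          | none => some a
          | some m => if PySem.Str.len a ≤ PySem.Str.len m then some a else some m)
          = if PySem.Str.len a ≤ PySem.Str.len m' then some a else some m' := rfl
      rw [hred] at hf
      split_ifs at hf with hk
      · simp only [Option.some.injEq] at hf
        subst hf
        intro y hy _
        rcases List.mem_cons.mp hy with rfl | hy
        · exact le_refl _
        · exact List.rel_of_pairwise_cons hp hy
      · simp only [Option.some.injEq] at hf
        subst hf
        have hmin := firstMin_min _ t _ hx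
        intro y hy hlen
        rcases List.mem_cons.mp hy with rfl | hy
        · omega
        · exact ih _ hp.tail hx y hy hlen

-- ---- A equals sumScore ----
theorem Solve_unfold (N K : Int) (V : List String) (hV : ¬ V = [])
    (V2 : List String) (hv2 : V2 = PySem.List.sorted (PySem.List.sorted V (fun s => s)) (fun s => PySem.Str.len s))
    (h0 : String) (hh0 : h0 = PySem.List.pyGetD V2 0 "")
    (m1 : Int) (hm1 : m1 = (PySem.List.pyRange 1 (PySem.List.len V2)).foldl (fun acc i => if h0 == PySem.List.pyGetD V2 i "" then acc + 1 else acc) 1)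
    (m2 : Int) (hm2 : m2 = if m1 ≥ K then PySem.Str.len h0 else m1)
    (m3 : Int) (hm3 : m3 = if m2 = 1 ∧ PySem.Str.len h0 ≠ 1 then 0 else m2) :
    Solve N K V = m3 + Solve N K (V2.filter (fun k => PySem.Str.len h0 < PySem.Str.len k)) := by
  subst hv2 hh0 hm1 hm2 hm3
  rw [Solve]
  rw [if_neg hV]

theorem beq_swap (a b : String) : (a == b) = (b == a) := by
  by_cases h : a = b
  · subst h; rfl
  · simp [h, Ne.symm h]

theorem m3_eq_sc (K L0 c : Int) :
    (if (if c ≥ K then L0 else c) = 1 ∧ L0 ≠ 1 then 0 else (if c ≥ K then L0 else c)) = sc K L0 c := by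
  unfold sc
  split_ifs <;> omega

theorem Solve_eq_sumScore (N K : Int) : ∀ (V : List String), Solve N K V = sumScore K V := by
  suffices H : ∀ (n : Nat) (V : List String), V.length ≤ n → Solve N K V = sumScore K V by
    exact fun V => H V.length V le_rfl
  intro n
  induction n with
  | zero =>
    intro V hlen
    have hV : V = [] := List.eq_nil_of_length_eq_zero (Nat.le_zero.mp hlen)
    subst hV
    rw [Solve]
    simp [sumScore]
  | succ n ih =>
    intro V hlen
    by_cases hV : V = []
    · subst hV
      rw [Solve]
      simp [sumScore]
    · -- notation
      set V2 := PySem.List.sorted (PySem.List.sorted V (fun s => s)) (fun s => PySem.Str.len s) with hV2def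
      have hperm : V2.Perm V :=
        (PySem.List.sorted_perm _ _ _).trans (PySem.List.sorted_perm _ _ _)
      have hne : V2 ≠ [] := by
        simp only [hV2def, ne_eq, PySem.List.sorted_eq_nil_iff]; exact hV
      obtain ⟨h, t, hV2cons⟩ : ∃ h t, V2 = h :: t := by
        cases hc : V2 with
        | nil => exact absurd hc hne
        | cons a b => exact ⟨a, b, rfl⟩
      have hget0 : PySem.List.pyGetD V2 0 "" = h := by
        rw [hV2cons, PySem.List.pyGetD_of_nonneg _ _ (by omega)]
        rfl
      -- the head is the first minimal-length element of the lexicographically sorted list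
      have hfm : firstMin PySem.Str.len (PySem.List.sorted V (fun s => s)) = some h := by
        rw [← head_sorted_eq_firstMin, ← hV2def, hV2cons]
        rfl
      have hfmm := firstMin_min PySem.Str.len _ _ hfm
      have hmemV1 : ∀ y, y ∈ PySem.List.sorted V (fun s => s) ↔ y ∈ V := by
        intro y; exact PySem.List.mem_sorted _ _ _ _
      have hhV : h ∈ V := (hmemV1 h).mp hfmm.1
      have hminlen : ∀ y ∈ V, PySem.Str.len h ≤ PySem.Str.len y := by
        intro y hy; exact hfmm.2 y ((hmemV1 y).mpr hy)
      have hpairV1 : (PySem.List.sorted V (fun s => s)).Pairwise (· ≤ ·) := by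
        have := PySem.List.sorted_pairwise V (fun s => s)
        simpa using this
      have hlex : ∀ y ∈ V, PySem.Str.len y = PySem.Str.len h → h ≤ y := by
        intro y hy hlen'
        exact firstMin_lex_min _ h hpairV1 hfm y ((hmemV1 y).mpr hy) hlen'
      -- the loop counts the occurrences of h in V
      have hm1 : (PySem.List.pyRange 1 (PySem.List.len V2)).foldl
          (fun acc i => if h == PySem.List.pyGetD V2 i "" then acc + 1 else acc) 1
          = (V.count h : Int) := by
        rw [PySem.List.foldl_pyRange_pyGetD V2 "" (fun acc x => if h == x then acc + 1 else acc) 1 (by omega)]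
        have hbody : (fun (acc : Int) (x : String) => if h == x then acc + 1 else acc)
            = fun acc x => if x == h then acc + 1 else acc := by
          funext acc x; rw [beq_swap]
        rw [hbody, PySem.List.foldl_beq_add_one]
        have hdrop : List.drop ((1:Int)).toNat V2 = t := by rw [hV2cons]; rfl
        rw [hdrop]
        have hcv : V.count h = t.count h + 1 := by
          rw [← hperm.count_eq, hV2cons, List.count_cons_self]
        rw [hcv]
        push_cast
        ring
      -- the score of the minimal-length group
      have hgmin : gmin (grp V (PySem.Str.len h)) = some h := by
        rw [gmin_eq_some_iff]
        constructor
        · exact List.mem_filter.mpr ⟨hhV, by simp⟩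
        · intro y hy
          have := List.mem_filter.mp hy
          exact hlex y this.1 (by simpa using this.2)
      have hcnt : (grp V (PySem.Str.len h)).count h = V.count h :=
        List.count_filter (by simp)
      have hscore : score K V (PySem.Str.len h) = sc K (PySem.Str.len h) ((V.count h : Int)) := by
        unfold score
        rw [hgmin]
        show sc K (PySem.Str.len h) (((grp V (PySem.Str.len h)).count h : Int))
            = sc K (PySem.Str.len h) ((V.count h : Int))
        rw [hcnt]
      -- the recursive argument
      set auxV := V2.filter (fun k => decide (PySem.Str.len h < PySem.Str.len k)) with hauxdef
      have hauxmem : ∀ y, y ∈ auxV ↔ y ∈ V ∧ PySem.Str.len h < PySem.Str.len y := by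
        intro y
        rw [hauxdef, List.mem_filter]
        simp [hperm.mem_iff]
      have hauxlen : auxV.length < V.length := by
        have h2 : V2.length = V.length := hperm.length_eq
        have : auxV.length < V2.length := by
          rw [hauxdef, List.length_filter_lt_length_iff_exists]
          refine ⟨h, by rw [hV2cons]; exact List.mem_cons_self, by simp⟩
        omega
      have hIH : Solve N K auxV = sumScore K auxV := by
        apply ih
        omega
      -- split the sum of scores at the minimal length
      have hnotmem : PySem.Str.len h ∉ (auxV.map PySem.Str.len).toFinset := by
        intro hmem
        obtain ⟨y, hy, hyl⟩ := List.mem_map.mp (List.mem_toFinset.mp hmem)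
        have := (hauxmem y).mp hy
        omega
      have hsplit : (V.map PySem.Str.len).toFinset
          = insert (PySem.Str.len h) (auxV.map PySem.Str.len).toFinset := by
        ext L
        simp only [List.mem_toFinset, List.mem_map, Finset.mem_insert]
        constructor
        · rintro ⟨y, hyV, rfl⟩
          by_cases hyl : PySem.Str.len y = PySem.Str.len h
          · exact Or.inl hyl
          · refine Or.inr ⟨y, (hauxmem y).mpr ⟨hyV, lt_of_le_of_ne (hminlen y hyV) (Ne.symm hyl)⟩, rfl⟩
        · rintro (rfl | ⟨y, hy, rfl⟩)
          · exact ⟨h, hhV, rfl⟩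
          · exact ⟨y, ((hauxmem y).mp hy).1, rfl⟩
      -- scores of the longer groups are unchanged when the short strings are dropped
      have hsame : ∀ L ∈ (auxV.map PySem.Str.len).toFinset, score K V L = score K auxV L := by
        intro L hL
        obtain ⟨y, hy, hyl⟩ := List.mem_map.mp (List.mem_toFinset.mp hL)
        have hLgt : PySem.Str.len h < L := by
          have := (hauxmem y).mp hy
          omega
        apply score_congr_perm
        have hgrps : grp auxV L = grp V2 L := by
          unfold grp
          rw [hauxdef, List.filter_filter]
          apply List.filter_congr
          intro a _
          cases hq : (PySem.Str.len a == L) with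
          | false => simp [hq]
          | true =>
            have haL : PySem.Str.len a = L := by simpa using hq
            rw [Bool.true_and]
            simp only [haL]
            simpa using hLgt
        rw [hgrps]
        unfold grp
        exact (hperm.filter _).symm
      -- assemble
      rw [Solve_unfold N K V hV V2 hV2def h hget0.symm _ rfl _ rfl _ rfl]
      rw [hm1]
      rw [m3_eq_sc K (PySem.Str.len h) (V.count h : Int)]
      rw [← hscore, hIH]
      unfold sumScore
      rw [hsplit, Finset.sum_insert hnotmem]
      have : ∑ L ∈ (auxV.map PySem.Str.len).toFinset, score K V L
          = ∑ L ∈ (auxV.map PySem.Str.len).toFinset, score K auxV L :=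
        Finset.sum_congr rfl hsame
      omega

-- ---- B equals sumScore ----
def step1 (o : Option (String × Int)) (s : String) : Option (String × Int) :=
  match o with
  | none => some (s, 1)
  | some mc =>
    if s < mc.1 then some (s, 1)
    else if s = mc.1 then some (mc.1, mc.2 + 1)
    else some mc

theorem solveStep_get?_self (d : PySem.Dict Int (String × Int)) (x : String) :
    (solveStep d x).get? (PySem.Str.len x) = step1 (d.get? (PySem.Str.len x)) x := by
  unfold solveStep step1
  cases hd : d.get? (PySem.Str.len x) with
  | none => exact PySem.Dict.get?_insert_self d _ _
  | some mc =>
    show (if x < mc.1 then d.insert (PySem.Str.len x) (x, 1)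
          else if x = mc.1 then d.insert (PySem.Str.len x) (mc.1, mc.2 + 1) else d).get? (PySem.Str.len x)
        = (if x < mc.1 then some (x, 1) else if x = mc.1 then some (mc.1, mc.2 + 1) else some mc)
    by_cases h1 : x < mc.1
    · rw [if_pos h1, if_pos h1]; exact PySem.Dict.get?_insert_self d _ _
    · by_cases h2 : x = mc.1
      · rw [if_neg h1, if_pos h2, if_neg h1, if_pos h2]; exact PySem.Dict.get?_insert_self d _ _
      · rw [if_neg h1, if_neg h2, if_neg h1, if_neg h2, hd]

theorem solveStep_get?_ne (d : PySem.Dict Int (String × Int)) (x : String) (L : Int)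
    (hL : PySem.Str.len x ≠ L) : (solveStep d x).get? L = d.get? L := by
  unfold solveStep
  cases hd : d.get? (PySem.Str.len x) with
  | none => exact PySem.Dict.get?_insert_of_ne _ _ (fun h => hL h.symm)
  | some mc =>
    show (if x < mc.1 then d.insert (PySem.Str.len x) (x, 1)
          else if x = mc.1 then d.insert (PySem.Str.len x) (mc.1, mc.2 + 1) else d).get? L = d.get? L
    by_cases h1 : x < mc.1
    · rw [if_pos h1]; exact PySem.Dict.get?_insert_of_ne _ _ (fun h => hL h.symm)
    · by_cases h2 : x = mc.1
      · rw [if_neg h1, if_pos h2]; exact PySem.Dict.get?_insert_of_ne _ _ (fun h => hL h.symm)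
      · rw [if_neg h1, if_neg h2]

theorem get?_foldl_solveStep (xs : List String) :
    ∀ (d : PySem.Dict Int (String × Int)) (L : Int),
      (xs.foldl solveStep d).get? L
        = (xs.filter (fun s => PySem.Str.len s == L)).foldl step1 (d.get? L) := by
  induction xs with
  | nil => intro d L; rfl
  | cons x xs ih =>
    intro d L
    simp only [List.foldl_cons, List.filter_cons]
    by_cases hL : PySem.Str.len x = L
    · rw [if_pos (by simpa using hL)]
      rw [ih, List.foldl_cons]
      congr 1
      rw [← hL]
      exact solveStep_get?_self d x
    · rw [if_neg (by simpa using hL)]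
      rw [ih]
      congr 1
      exact solveStep_get?_ne d x L hL

theorem keys_foldl_solveStep (xs : List String) :
    ∀ (d : PySem.Dict Int (String × Int)),
      (xs.foldl solveStep d).keys = PySem.Set.update d.keys (xs.map PySem.Str.len) := by
  induction xs with
  | nil => intro d; rfl
  | cons x xs ih =>
    intro d
    simp only [List.foldl_cons, List.map_cons]
    rw [ih]
    have hstep : (solveStep d x).keys = PySem.Set.add d.keys (PySem.Str.len x) := by
      unfold solveStep
      cases hd : d.get? (PySem.Str.len x) with
      | none =>
        have hc : d.contains (PySem.Str.len x) = false :=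
          (PySem.Dict.get?_eq_none_iff_contains d _).mp hd
        have hmemk : PySem.Str.len x ∉ d.keys :=
          (PySem.Dict.get?_eq_none_iff_not_mem_keys d _).mp hd
        rw [PySem.Dict.keys_insert_of_not_contains d _ hc]
        unfold PySem.Set.add
        rw [if_neg (by simpa using hmemk)]
      | some mc =>
        have hc : d.contains (PySem.Str.len x) = true := by
          cases h : d.contains (PySem.Str.len x)
          · rw [(PySem.Dict.get?_eq_none_iff_contains d _).mpr h] at hd; cases hd
          · rfl
        have hmemk : PySem.Str.len x ∈ d.keys := (PySem.Dict.contains_iff_mem_keys d _).mp hc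
        have hadd : PySem.Set.add d.keys (PySem.Str.len x) = d.keys := by
          unfold PySem.Set.add
          rw [if_pos (by simpa using hmemk)]
        rw [hadd]
        show (if x < mc.1 then d.insert (PySem.Str.len x) (x, 1)
              else if x = mc.1 then d.insert (PySem.Str.len x) (mc.1, mc.2 + 1) else d).keys = d.keys
        by_cases h1 : x < mc.1
        · rw [if_pos h1]; exact PySem.Dict.keys_insert_of_contains d _ hc
        · by_cases h2 : x = mc.1
          · rw [if_neg h1, if_pos h2]; exact PySem.Dict.keys_insert_of_contains d _ hc
          · rw [if_neg h1, if_neg h2]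
    rw [hstep]
    rfl

theorem step1_fold_some (G : List String) :
    ∀ (m : String) (c : Int),
      G.foldl step1 (some (m, c)) =
        some (G.foldl min m, (if G.foldl min m = m then c else 0) + (G.count (G.foldl min m) : Int)) := by
  induction G with
  | nil => intro m c; simp
  | cons s G ih =>
    intro m c
    have hle := PySem.List.foldl_min_le G
    simp only [List.foldl_cons]
    by_cases h1 : s < m
    · have hmin : min m s = s := min_eq_right (le_of_lt h1)
      have hstep : step1 (some (m, c)) s = some (s, 1) := by simp [step1, h1]
      rw [hstep, ih]; simp only [List.foldl_cons, hmin]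
      have hMm : G.foldl min s ≠ m := by
        have h := (hle s).1
        intro he; rw [he] at h; exact absurd (lt_of_le_of_lt h h1) (lt_irrefl _)
      rw [List.count_cons]
      simp only [hMm, if_false, beq_iff_eq]
      rcases eq_or_ne (G.foldl min s) s with h | h
      · rw [if_pos h, if_pos h.symm]; simp only [Option.some.injEq, Prod.mk.injEq, true_and]; push_cast; omega
      · rw [if_neg h, if_neg (Ne.symm h)]; simp only [Option.some.injEq, Prod.mk.injEq, true_and]; push_cast; omega
    · by_cases h2 : s = m
      · subst h2
        have hmin : min s s = s := min_self s
        have hstep : step1 (some (s, c)) s = some (s, c + 1) := by simp [step1, h1]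
        rw [hstep, ih]; simp only [List.foldl_cons, hmin]
        rw [List.count_cons]
        simp only [beq_iff_eq]
        rcases eq_or_ne (G.foldl min s) s with h | h
        · rw [if_pos h, if_pos h, if_pos h.symm]; simp only [Option.some.injEq, Prod.mk.injEq, true_and]; push_cast; omega
        · rw [if_neg h, if_neg h, if_neg (Ne.symm h)]; simp only [Option.some.injEq, Prod.mk.injEq, true_and]; push_cast; omega
      · have hlt : m < s := lt_of_le_of_ne (not_lt.mp h1) (fun h => h2 h.symm)
        have hmin : min m s = m := min_eq_left (le_of_lt hlt)
        have hstep : step1 (some (m, c)) s = some (m, c) := by simp [step1, h1, h2]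
        rw [hstep, ih]; simp only [List.foldl_cons, hmin]
        have hMs : G.foldl min m ≠ s := by
          have h := (hle m).1
          intro he; rw [he] at h; exact absurd (lt_of_le_of_lt h hlt) (lt_irrefl _)
        rw [List.count_cons]
        simp only [beq_iff_eq]
        rw [if_neg (Ne.symm hMs)]
        simp only [Option.some.injEq, Prod.mk.injEq, true_and]
        push_cast
        ring

theorem step1_fold_group (G : List String) (hG : G ≠ []) (m : String) (hm : gmin G = some m) :
    G.foldl step1 none = some (m, (G.count m : Int)) := by
  cases G with
  | nil => exact absurd rfl hG
  | cons x t =>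
    simp only [gmin, Option.some.injEq] at hm
    subst hm
    have hstep : step1 none x = some (x, 1) := rfl
    simp only [List.foldl_cons, hstep]
    rw [step1_fold_some t x 1]
    congr 1
    rw [List.count_cons]
    simp only [beq_iff_eq]
    rcases eq_or_ne (t.foldl min x) x with h | h
    · rw [if_pos h, if_pos h.symm]; simp only [Option.some.injEq, Prod.mk.injEq, true_and]; push_cast; omega
    · rw [if_neg h, if_neg (Ne.symm h)]; simp only [Option.some.injEq, Prod.mk.injEq, true_and]; push_cast; omega

theorem Solve_alt_eq_sumScore (N K : Int) (V : List String) : Solve_alt N K V = sumScore K V := by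
  simp only [Solve_alt]
  have hkeys : (V.foldl solveStep PySem.Dict.empty).keys = PySem.Set.ofList (V.map PySem.Str.len) := by
    rw [keys_foldl_solveStep]; rfl
  have hnd : (V.foldl solveStep PySem.Dict.empty).keys.Nodup := by
    rw [hkeys]; exact PySem.Set.nodup_ofList _
  have hitems := PySem.Dict.items_eq_map_keys (V.foldl solveStep PySem.Dict.empty) hnd ("", 0)
  rw [hitems]
  have hfun : (fun (tot : Int) (p : Int × (String × Int)) =>
      if p.2.2 ≥ K then tot + p.1 else if p.2.2 > 1 ∨ p.1 = 1 then tot + p.2.2 else tot)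
      = fun tot p => tot + (if p.2.2 ≥ K then p.1 else if p.2.2 > 1 ∨ p.1 = 1 then p.2.2 else 0) := by
    funext tot p
    split_ifs <;> omega
  rw [hfun, PySem.List.foldl_add, List.map_map]
  have hpt : ∀ L ∈ (V.foldl solveStep PySem.Dict.empty).keys,
      ((fun p : Int × (String × Int) =>
          if p.2.2 ≥ K then p.1 else if p.2.2 > 1 ∨ p.1 = 1 then p.2.2 else 0) ∘
        fun L => (L, (V.foldl solveStep PySem.Dict.empty).getD L ("", 0))) L = score K V L := by
    intro L hL
    rw [hkeys] at hL
    have hLlen : L ∈ V.map PySem.Str.len := (PySem.Set.mem_ofList _ _).mp hL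
    obtain ⟨s, hsV, hsL⟩ := List.mem_map.mp hLlen
    have hsG : s ∈ grp V L := by
      unfold grp
      exact List.mem_filter.mpr ⟨hsV, by simp only [beq_iff_eq]; exact hsL⟩
    have hGne : grp V L ≠ [] := List.ne_nil_of_mem hsG
    obtain ⟨m, hm⟩ : ∃ m, gmin (grp V L) = some m := by
      cases hG : grp V L with
      | nil => exact absurd hG hGne
      | cons x t => exact ⟨_, rfl⟩
    have hget : (V.foldl solveStep PySem.Dict.empty).get? L = some (m, ((grp V L).count m : Int)) := by
      rw [get?_foldl_solveStep]
      rw [PySem.Dict.get?_empty]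
      exact step1_fold_group _ hGne m hm
    have hgetD : (V.foldl solveStep PySem.Dict.empty).getD L ("", 0) = (m, ((grp V L).count m : Int)) := by
      rw [PySem.Dict.getD_eq_get?_getD, hget]; rfl
    have hcpos : 1 ≤ ((grp V L).count m : Int) := by
      have : 0 < (grp V L).count m := List.count_pos_iff.mpr ((gmin_eq_some_iff _ _).mp hm).1
      omega
    simp only [Function.comp_apply, hgetD]
    have hscore : score K V L = sc K L ((grp V L).count m : Int) := by
      unfold score; rw [hm]
    rw [hscore]
    unfold sc
    split_ifs <;> omega
  rw [List.map_congr_left hpt]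
  have hsum : ((V.foldl solveStep PySem.Dict.empty).keys.map (score K V)).sum
      = ∑ L ∈ (V.map PySem.Str.len).toFinset, score K V L := by
    rw [← List.sum_toFinset _ hnd]
    apply Finset.sum_congr ?_ (fun _ _ => rfl)
    ext L
    simp only [List.mem_toFinset, hkeys, PySem.Set.mem_ofList]
  rw [hsum]
  unfold sumScore
  omega

-- ===== VERDICT (by name: the statement is the Claim_ definition above) =====
theorem Solve_spec : Claim_equal_Solve := by
  intro N K V _
  unfold Spec_Solve
  rw [Solve_eq_sumScore, Solve_alt_eq_sumScore]
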